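-- pv_equiv track=rewrite | github.com/klusta-team/spikedetekt | spikedetekt/files.py | chunk_bounds
-- ===== SOURCE A (Python) =====
-- def chunk_bounds(n_samples, chunk_size, overlap):
--     '''
--     Returns chunks of the form:
--     [ overlap/2 | chunk_size-overlap | overlap/2 ]
--     s_start   keep_start           keep_end     s_end
--     Except for the first and last chunks which do not have a left/right overlap
--     '''
--     s_start = 0
--     s_end = chunk_size
--     keep_start = s_start
--     keep_end = s_end-overlap//2
--     yield s_start,s_end,keep_start,keep_end
--
--     while s_end-overlap+chunk_size < n_samples:
--         s_start = s_end-overlap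
--         s_end = s_start+chunk_size
--         keep_start = keep_end
--         keep_end = s_end-overlap//2
--         yield s_start,s_end,keep_start,keep_end
--
--     s_start = s_end-overlap
--     s_end = n_samples
--     keep_start = keep_end
--     keep_end = s_end
--     yield s_start,s_end,keep_start,keep_end
-- ===== SOURCE B (Python) =====
-- def chunk_bounds(n_samples, chunk_size, overlap):
--     step = chunk_size - overlap
--     half = overlap // 2
--     if step > 0:
--         m = max(0, -(-(n_samples - chunk_size) // step) - 1)
--     else:
--         m = 0
--     yield 0, chunk_size, 0, chunk_size - half
--     for i in range(1, m + 1):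
--         e = i * step + chunk_size
--         yield i * step, e, e - step - half, e - half
--     e = chunk_size + m * step
--     yield e - overlap, n_samples, e - half, n_samples
-- ===== Notes on version B (the rewrite author's own statement) =====
-- stated objective: alternative
-- what changed: B replaces A's while loop that threads s_start/s_end/keep_start/keep_end between iterations with a closed-form chunk count m (ceiling division) and direct index-based formulas for each chunk, emitted via a for loop over range(1, m+1).
import Mathlib
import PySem

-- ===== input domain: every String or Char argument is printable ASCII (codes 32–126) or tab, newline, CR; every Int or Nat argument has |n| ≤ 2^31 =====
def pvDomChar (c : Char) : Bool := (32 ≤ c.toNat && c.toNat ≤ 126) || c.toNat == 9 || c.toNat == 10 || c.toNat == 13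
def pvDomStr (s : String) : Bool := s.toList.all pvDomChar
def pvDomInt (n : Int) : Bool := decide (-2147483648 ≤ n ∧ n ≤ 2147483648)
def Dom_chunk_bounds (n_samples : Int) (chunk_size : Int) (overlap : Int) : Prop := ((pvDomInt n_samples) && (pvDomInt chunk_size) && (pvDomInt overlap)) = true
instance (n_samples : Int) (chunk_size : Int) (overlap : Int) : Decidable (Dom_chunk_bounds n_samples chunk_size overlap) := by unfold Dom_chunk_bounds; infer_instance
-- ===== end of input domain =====

-- B replaces A's state-threading while loop by a closed-form chunk count and index-based
-- formulas for each chunk (objective: alternative decomposition, same cost).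

-- ===== PORT A =====
-- A's while loop, with fuel for totality; under Pre_ the fuel is never exhausted, and the
-- fuel-exhausted value coincides with the loop-exit value so the port is exact on Pre_.
def chunkLoopA (fuel : Nat) (n_samples chunk_size overlap : Int)
    (s_end keep_end : Int) (acc : List (Int × Int × Int × Int)) : List (Int × Int × Int × Int) :=
  match fuel with
  | 0 => ((s_end - overlap, n_samples, keep_end, n_samples) :: acc).reverse
  | fuel + 1 =>
    if s_end - overlap + chunk_size < n_samples then
      let s_start := s_end - overlap
      let s_end' := s_start + chunk_size
      let keep_start := keep_end
      let keep_end' := s_end' - PySem.Int.floordiv overlap 2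
      chunkLoopA fuel n_samples chunk_size overlap s_end' keep_end'
        ((s_start, s_end', keep_start, keep_end') :: acc)
    else
      ((s_end - overlap, n_samples, keep_end, n_samples) :: acc).reverse

def chunk_bounds (n_samples : Int) (chunk_size : Int) (overlap : Int) : List (Int × Int × Int × Int) :=
  let s_start : Int := 0
  let s_end := chunk_size
  let keep_start := s_start
  let keep_end := s_end - PySem.Int.floordiv overlap 2
  chunkLoopA (n_samples - chunk_size).toNat n_samples chunk_size overlap s_end keep_end
    [(s_start, s_end, keep_start, keep_end)]

-- ===== PORT B =====
def chunk_bounds_alt (n_samples : Int) (chunk_size : Int) (overlap : Int) : List (Int × Int × Int × Int) :=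
  let step := chunk_size - overlap
  let half := PySem.Int.floordiv overlap 2
  let m : Int :=
    if step > 0 then
      max 0 (-(PySem.Int.floordiv (-(n_samples - chunk_size)) step) - 1)
    else 0
  (0, chunk_size, 0, chunk_size - half) ::
    ((PySem.List.pyRange 1 (m + 1) 1).map (fun i =>
      (i * step, i * step + chunk_size,
       i * step + chunk_size - step - half, i * step + chunk_size - half))
    ++ [(chunk_size + m * step - overlap, n_samples,
         chunk_size + m * step - half, n_samples)])

-- ===== PRECONDITION & SPEC =====
-- Pre_ excludes exactly the inputs on which A's while loop never terminates (the generator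
-- yields middle chunks forever): overlap ≥ chunk_size with the loop guard initially true.
def Pre_chunk_bounds (n_samples : Int) (chunk_size : Int) (overlap : Int) : Prop :=
  0 < chunk_size - overlap ∨ n_samples ≤ 2 * chunk_size - overlap
instance (n_samples : Int) (chunk_size : Int) (overlap : Int) : Decidable (Pre_chunk_bounds n_samples chunk_size overlap) := by unfold Pre_chunk_bounds; infer_instance

def pvWitness_chunk_bounds : Int × Int × Int := (100, 30, 10)

def Spec_chunk_bounds (n_samples : Int) (chunk_size : Int) (overlap : Int) (out : List (Int × Int × Int × Int)) : Prop := out = chunk_bounds_alt n_samples chunk_size overlap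
instance (n_samples : Int) (chunk_size : Int) (overlap : Int) (out : List (Int × Int × Int × Int)) : Decidable (Spec_chunk_bounds n_samples chunk_size overlap out) := by unfold Spec_chunk_bounds; infer_instance

-- ===== CLAIM (what is proved, stated in full; the proofs are below) =====
def Claim_equal_chunk_bounds : Prop := ∀ (n_samples : Int) (chunk_size : Int) (overlap : Int), Dom_chunk_bounds n_samples chunk_size overlap → Pre_chunk_bounds n_samples chunk_size overlap → Spec_chunk_bounds n_samples chunk_size overlap (chunk_bounds n_samples chunk_size overlap)

-- ===== LEMMAS AND PROOFS =====

-- middle-chunk formula used by B's port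
def pvMid (chunk_size overlap : Int) (i : Int) : Int × Int × Int × Int :=
  (i * (chunk_size - overlap), i * (chunk_size - overlap) + chunk_size,
   i * (chunk_size - overlap) + chunk_size - (chunk_size - overlap) - PySem.Int.floordiv overlap 2,
   i * (chunk_size - overlap) + chunk_size - PySem.Int.floordiv overlap 2)

-- loop guard characterisation: for step > 0 and j ≥ 1, the guard at middle chunk j holds iff j ≤ m
theorem pv_guard_iff (n cs ov : Int) (hstep : 0 < cs - ov) (j : Int) (hj : 1 ≤ j) :
    (cs + j * (cs - ov) < n ↔ j ≤ max 0 (-(PySem.Int.floordiv (-(n - cs)) (cs - ov)) - 1)) := by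
  set step := cs - ov with hdef
  set c := -(PySem.Int.floordiv (-(n - cs)) step) with hc
  have hch : (c - 1) * step < n - cs ∧ n - cs ≤ c * step :=
    (PySem.Int.neg_floordiv_neg_eq_iff_of_pos hstep).mp hc.symm
  constructor
  · intro h
    have h1 : j * step < n - cs := by linarith
    have h2 : j * step < c * step := lt_of_lt_of_le h1 hch.2
    have h3 : j < c := lt_of_mul_lt_mul_right h2 (by linarith)
    omega
  · intro h
    have hjc : j ≤ c - 1 := by omega
    have h1 : j * step ≤ (c - 1) * step :=
      mul_le_mul_of_nonneg_right hjc (by linarith)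
    have := hch.1
    linarith

-- the loop of A, started at middle index k, produces B's middle chunks (k+1 .. m) and the last chunk
theorem pv_loopA_eq (n cs ov : Int) (hstep : 0 < cs - ov) :
    ∀ (fuel : Nat) (k : Int) (acc : List (Int × Int × Int × Int)), 0 ≤ k →
      k ≤ max 0 (-(PySem.Int.floordiv (-(n - cs)) (cs - ov)) - 1) →
      (max 0 (-(PySem.Int.floordiv (-(n - cs)) (cs - ov)) - 1) - k).toNat ≤ fuel →
      chunkLoopA fuel n cs ov (cs + k * (cs - ov))
        (cs + k * (cs - ov) - PySem.Int.floordiv ov 2) acc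
      = acc.reverse ++ (PySem.List.pyRange (k + 1) (max 0 (-(PySem.Int.floordiv (-(n - cs)) (cs - ov)) - 1) + 1) 1).map (pvMid cs ov)
        ++ [(cs + (max 0 (-(PySem.Int.floordiv (-(n - cs)) (cs - ov)) - 1)) * (cs - ov) - ov, n,
             cs + (max 0 (-(PySem.Int.floordiv (-(n - cs)) (cs - ov)) - 1)) * (cs - ov) - PySem.Int.floordiv ov 2, n)] := by
  set m := max 0 (-(PySem.Int.floordiv (-(n - cs)) (cs - ov)) - 1) with hm
  intro fuel
  induction fuel with
  | zero =>
    intro k acc hk0 hkm hfuel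
    have hk : k = m := by omega
    subst hk
    rw [PySem.List.pyRange_one_eq_nil (by omega)]
    simp [chunkLoopA]
  | succ fuel ih =>
    intro k acc hk0 hkm hfuel
    have hguard : (cs + k * (cs - ov) - ov + cs < n) ↔ (k + 1 ≤ m) := by
      have h := pv_guard_iff n cs ov hstep (k + 1) (by omega)
      rw [hm]
      constructor
      · intro hlt; exact h.mp (by ring_nf; ring_nf at hlt; linarith)
      · intro hle; have := h.mpr hle; ring_nf; ring_nf at this; linarith
    by_cases hg : cs + k * (cs - ov) - ov + cs < n
    · have hk1 : k + 1 ≤ m := hguard.mp hg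
      have hstate : cs + k * (cs - ov) - ov + cs = cs + (k + 1) * (cs - ov) := by ring
      rw [chunkLoopA, if_pos hg]
      have hhead : (cs + k * (cs - ov) - ov, cs + k * (cs - ov) - ov + cs,
          cs + k * (cs - ov) - PySem.Int.floordiv ov 2,
          cs + k * (cs - ov) - ov + cs - PySem.Int.floordiv ov 2) = pvMid cs ov (k + 1) := by
        simp only [pvMid, Prod.mk.injEq]
        refine ⟨by ring, by ring, by ring, by ring⟩
      have := ih (k + 1) (pvMid cs ov (k + 1) :: acc) (by omega) hk1 (by omega)
      dsimp only
      rw [hhead, hstate, this]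
      rw [PySem.List.pyRange_one_cons (by omega : k + 1 < m + 1)]
      simp
    · have hk : k = m := by omega
      subst hk
      rw [chunkLoopA, if_neg hg, PySem.List.pyRange_one_eq_nil (by omega)]
      simp

-- m fits in the fuel (n - cs).toNat
theorem pv_m_le_fuel (n cs ov : Int) (hstep : 0 < cs - ov) :
    (max 0 (-(PySem.Int.floordiv (-(n - cs)) (cs - ov)) - 1)).toNat ≤ (n - cs).toNat := by
  set c := -(PySem.Int.floordiv (-(n - cs)) (cs - ov)) with hc
  have hch : (c - 1) * (cs - ov) < n - cs ∧ n - cs ≤ c * (cs - ov) :=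
    (PySem.Int.neg_floordiv_neg_eq_iff_of_pos hstep).mp hc.symm
  by_cases h : c - 1 ≤ 0
  · omega
  · have h1 : (c - 1) * 1 ≤ (c - 1) * (cs - ov) :=
      mul_le_mul_of_nonneg_left (by omega) (by omega)
    have := hch.1
    omega

-- when the guard is false at entry, the loop yields only the last chunk (any fuel)
theorem pv_loopA_exit (fuel : Nat) (n cs ov s_end keep_end : Int)
    (acc : List (Int × Int × Int × Int)) (hg : ¬ s_end - ov + cs < n) :
    chunkLoopA fuel n cs ov s_end keep_end acc
      = acc.reverse ++ [(s_end - ov, n, keep_end, n)] := by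
  cases fuel with
  | zero => simp [chunkLoopA]
  | succ fuel => rw [chunkLoopA, if_neg hg]; simp

-- ===== VERDICT (by name: the statement is the Claim_ definition above) =====
theorem chunk_bounds_spec : Claim_equal_chunk_bounds := by
  intro n cs ov _ hpre
  unfold Spec_chunk_bounds chunk_bounds chunk_bounds_alt
  dsimp only
  by_cases hstep : 0 < cs - ov
  · rw [if_pos hstep]
    have h0 := pv_loopA_eq n cs ov hstep (n - cs).toNat 0
      [((0 : Int), cs, (0 : Int), cs - PySem.Int.floordiv ov 2)] le_rfl
      (le_max_left _ _) (by have := pv_m_le_fuel n cs ov hstep; omega)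
    simp only [zero_mul, add_zero] at h0
    rw [h0]
    simp [pvMid]
  · rw [if_neg hstep]
    have hn : n ≤ 2 * cs - ov := by
      rcases hpre with h | h
      · omega
      · exact h
    rw [pv_loopA_exit _ _ _ _ _ _ _ (by omega)]
    rw [PySem.List.pyRange_one_eq_nil (by omega)]
    simp
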